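-- pv_equiv track=rewrite | github.com/Plutonium8T8/Python3E3 | Lab2/Lab2.py | Ex12
-- ===== SOURCE A (Python) =====
-- def Ex12(my_list):
--     res = []
--     formed_list = []
--
--     my_list_aux = []
--
--     for element in my_list:
--         if element not in my_list_aux:
--             my_list_aux.append(element)
--
--     my_list = my_list_aux
--
--     for word in my_list:
--         formed_list = [word]
--         for word2 in my_list:
--             if word != word2 and word[-2:] == word2[-2:]:
--                 formed_list.append(word2)
--         formed_list.sort()
--         if formed_list not in res:
--             res.append(formed_list)
--     return res
-- ===== SOURCE B (Python) =====
-- def Ex12(my_list):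
--     seen = set()
--     groups = {}
--     for w in my_list:
--         if w not in seen:
--             seen.add(w)
--             groups.setdefault(w[-2:], []).append(w)
--     return [sorted(g) for g in groups.values()]
-- ===== Notes on version B (the rewrite author's own statement) =====
-- stated objective: faster
-- what changed: Replaces A's quadratic list-membership dedupe, per-word rescans of the whole list and the 'formed_list not in res' duplicate-group test with one pass that dedupes via a set and groups words into a suffix-keyed insertion-ordered dict, then emits each group sorted.
import Mathlib
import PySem

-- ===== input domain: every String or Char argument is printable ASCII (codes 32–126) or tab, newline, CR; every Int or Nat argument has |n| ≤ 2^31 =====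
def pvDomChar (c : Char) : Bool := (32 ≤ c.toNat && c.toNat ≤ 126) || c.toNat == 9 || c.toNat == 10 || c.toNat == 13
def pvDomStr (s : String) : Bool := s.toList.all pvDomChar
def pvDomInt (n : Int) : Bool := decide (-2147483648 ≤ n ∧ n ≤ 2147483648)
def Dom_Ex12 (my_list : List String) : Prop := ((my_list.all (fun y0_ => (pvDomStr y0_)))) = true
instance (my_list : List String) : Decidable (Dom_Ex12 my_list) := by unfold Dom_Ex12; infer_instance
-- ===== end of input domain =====

-- B replaces A's per-word inner rescan and duplicate-group test by one grouping pass over the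
-- deduped words into a suffix-keyed insertion-ordered dict, then emits each group sorted (objective: faster).

-- w[-2:] — the last-2-character suffix both Pythons key on
def pvSuf (w : String) : String := PySem.Str.slice w (some (-2)) none

-- ===== PORT A =====
def Ex12 (my_list : List String) : List (List String) :=
  -- for element in my_list: if element not in my_list_aux: my_list_aux.append(element)
  let aux := my_list.foldl (fun acc e => if e ∈ acc then acc else acc ++ [e]) []
  -- for word in my_list: formed_list = [word]; inner scan; sort; dedup-append into res
  aux.foldl (fun res word =>
    let formed := PySem.List.sorted
      (aux.foldl (fun fl w2 =>
        if word ≠ w2 ∧ pvSuf word = pvSuf w2 then fl ++ [w2] else fl) [word])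
      (fun x => x) false
    if formed ∈ res then res else res ++ [formed]) []

-- ===== PORT B =====
def Ex12_alt (my_list : List String) : List (List String) :=
  -- for w in my_list: if w not in seen: seen.add(w); groups.setdefault(w[-2:], []).append(w)
  let st := my_list.foldl
    (fun (st : PySem.Set String × PySem.Dict String (List String)) w =>
      if w ∈ st.1 then st
      else (PySem.Set.add st.1 w, st.2.modify (pvSuf w) [] (fun g => g ++ [w])))
    ([], PySem.Dict.empty)
  -- [sorted(g) for g in groups.values()]
  st.2.values.map (fun g => PySem.List.sorted g (fun x => x) false)

-- ===== PRECONDITION & SPEC =====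
def Spec_Ex12 (my_list : List String) (out : List (List String)) : Prop := out = Ex12_alt my_list
instance (my_list : List String) (out : List (List String)) : Decidable (Spec_Ex12 my_list out) := by unfold Spec_Ex12; infer_instance

-- ===== CLAIM (what is proved, stated in full; the proofs are below) =====
def Claim_equal_Ex12 : Prop := ∀ (my_list : List String), Dom_Ex12 my_list → Spec_Ex12 my_list (Ex12 my_list)

-- ===== LEMMAS AND PROOFS =====

-- the deduped words B's seen-guard actually processes, starting from seen-set s
def pvNew (s : PySem.Set String) : List String → List String
  | [] => []
  | x :: xs => if x ∈ s then pvNew s xs else x :: pvNew (s ++ [x]) xs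

theorem pvUpdate_eq_append_pvNew (xs : List String) (s : PySem.Set String) :
    PySem.Set.update s xs = s ++ pvNew s xs := by
  induction xs generalizing s with
  | nil => simp [PySem.Set.update_nil, pvNew]
  | cons x xs ih =>
    rw [PySem.Set.update_cons]
    by_cases hx : x ∈ s
    · rw [PySem.Set.add_of_mem hx, ih s]
      simp [pvNew, hx]
    · rw [PySem.Set.add_of_not_mem hx, ih (s ++ [x])]
      simp [pvNew, hx]

theorem pvNew_nil_eq_ofList (xs : List String) :
    pvNew [] xs = PySem.Set.ofList xs := by
  have h := pvUpdate_eq_append_pvNew xs []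
  rw [PySem.Set.update_nil_left] at h
  simpa using h.symm

-- B's guarded one-pass fold splits into the deduped word list and the unguarded dict fold
theorem pvFoldB (xs : List String) (s : PySem.Set String)
    (d : PySem.Dict String (List String)) :
    xs.foldl
      (fun (st : PySem.Set String × PySem.Dict String (List String)) w =>
        if w ∈ st.1 then st
        else (PySem.Set.add st.1 w, st.2.modify (pvSuf w) [] (fun g => g ++ [w])))
      (s, d)
    = (PySem.Set.update s xs,
       (pvNew s xs).foldl (fun d w => d.modify (pvSuf w) [] (fun g => g ++ [w])) d) := by
  induction xs generalizing s d with
  | nil => simp [PySem.Set.update_nil, pvNew]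
  | cons x xs ih =>
    by_cases hx : x ∈ s
    · simp only [List.foldl_cons, if_pos hx, PySem.Set.update_cons,
        PySem.Set.add_of_mem hx, pvNew, ih]
    · simp only [List.foldl_cons, if_neg hx, PySem.Set.update_cons,
        PySem.Set.add_of_not_mem hx, pvNew, ih]

-- A's dedupe loop is set(xs) in first-appearance order
theorem pvAux_eq_ofList (xs : List String) :
    xs.foldl (fun acc e => if e ∈ acc then acc else acc ++ [e]) []
      = PySem.Set.ofList xs := by
  rw [PySem.Set.ofList_eq_foldl]
  exact PySem.List.foldl_congr_mem xs _ _ []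
    (fun acc x _ => (PySem.Set.add_eq_ite acc x).symm)

-- the dict built over the deduped list L: keys and per-key groups
theorem pvKeysD (L : List String) :
    ((L.foldl (fun d w => d.modify (pvSuf w) [] (fun g => g ++ [w]))
        PySem.Dict.empty : PySem.Dict String (List String))).keys
      = PySem.Set.ofList (L.map pvSuf) := by
  rw [PySem.Dict.keys_foldl_modify_key L pvSuf [] (fun _ w => fun g => g ++ [w])]
  simp [PySem.Dict.keys_empty, PySem.Set.update_nil_left]

theorem pvGetDD (L : List String) (c : String) :
    ((L.foldl (fun d w => d.modify (pvSuf w) [] (fun g => g ++ [w]))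
        PySem.Dict.empty : PySem.Dict String (List String))).getD c []
      = L.filter (fun w => pvSuf w == c) := by
  have h : L.foldl (fun d w => d.modify (pvSuf w) [] (fun g => g ++ [w]))
      (PySem.Dict.empty : PySem.Dict String (List String))
      = (L.map (fun w => (pvSuf w, w))).foldl
          (fun d p => d.modify p.1 [] (fun g => g ++ [p.2])) PySem.Dict.empty := by
    rw [List.foldl_map]
  rw [h, PySem.Dict.getD_foldl_modify_append, PySem.Dict.getD_empty]
  rw [List.filter_map]
  simp [Function.comp_def]

-- A's inner scan + sort equals the sorted full suffix class of the word (L deduped)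
theorem pvFormed_eq (L : List String) (hnd : L.Nodup) (w : String) (hw : w ∈ L) :
    PySem.List.sorted
      (L.foldl (fun fl w2 =>
        if w ≠ w2 ∧ pvSuf w = pvSuf w2 then fl ++ [w2] else fl) [w])
      (fun x => x) false
    = PySem.List.sorted (L.filter (fun x => pvSuf x == pvSuf w)) (fun x => x) false := by
  rw [PySem.List.foldl_append_ite_eq_filter]
  rw [PySem.List.sorted_id_eq_sorted_id_iff_perm]
  have hwf : w ∈ L.filter (fun x => pvSuf x == pvSuf w) := by
    simp [List.mem_filter, hw]
  have hperm := List.perm_cons_erase hwf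
  have hfe : (L.filter (fun x => pvSuf x == pvSuf w)).erase w
      = L.filter (fun x => decide (w ≠ x ∧ pvSuf w = pvSuf x)) := by
    rw [List.Nodup.erase_eq_filter (hnd.filter _) w, List.filter_filter]
    apply List.filter_congr
    intro x _
    by_cases hx : x = w
    · simp [hx]
    · by_cases hs : pvSuf x = pvSuf w
      · simp [bne, hx, hs, Ne.symm hx]
      · simp [bne, hx, hs, Ne.symm hx, Ne.symm hs]
  rw [hfe] at hperm
  exact (hperm.symm)

-- dedup of a mapped list is the mapped dedup, when the map is injective on the list
theorem pvOfList_map_of_injOn (g : String → List String) (l : List String)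
    (hinj : ∀ a ∈ l, ∀ b ∈ l, g a = g b → a = b) :
    PySem.Set.ofList (l.map g) = (PySem.Set.ofList l).map g := by
  induction l using List.reverseRecOn with
  | nil => simp [PySem.Set.ofList]
  | append_singleton l x ih =>
    have hinj' : ∀ a ∈ l, ∀ b ∈ l, g a = g b → a = b := fun a ha b hb =>
      hinj a (by simp [ha]) b (by simp [hb])
    rw [List.map_append, List.map_singleton, PySem.Set.ofList_append_singleton,
      PySem.Set.ofList_append_singleton, ih hinj',
      PySem.Set.add_eq_ite, PySem.Set.add_eq_ite]
    have hmem : g x ∈ (PySem.Set.ofList l).map g ↔ x ∈ PySem.Set.ofList l := by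
      constructor
      · intro h
        obtain ⟨y, hy, hgy⟩ := List.mem_map.mp h
        have hyl : y ∈ l := (PySem.Set.mem_ofList l y).mp hy
        have := hinj y (by simp [hyl]) x (by simp) hgy
        rwa [← this]
      · intro h; exact List.mem_map.mpr ⟨x, h, rfl⟩
    by_cases hx : x ∈ PySem.Set.ofList l
    · rw [if_pos (hmem.mpr hx), if_pos hx]
    · rw [if_neg (fun h => hx (hmem.mp h)), if_neg hx, List.map_append,
        List.map_singleton]

-- the sorted suffix-class map is injective on the suffixes that occur in L
theorem pvG_injOn (L : List String) :
    ∀ a ∈ L.map pvSuf, ∀ b ∈ L.map pvSuf,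
      PySem.List.sorted (L.filter (fun x => pvSuf x == a)) (fun x => x) false
        = PySem.List.sorted (L.filter (fun x => pvSuf x == b)) (fun x => x) false
      → a = b := by
  intro a ha b hb h
  obtain ⟨u, hu, hua⟩ := List.mem_map.mp ha
  have huf : u ∈ L.filter (fun x => pvSuf x == a) := by simp [List.mem_filter, hu, hua]
  have hus : u ∈ PySem.List.sorted (L.filter (fun x => pvSuf x == a)) (fun x => x) false :=
    ((PySem.List.sorted_perm _ _ _).mem_iff).mpr huf
  rw [h] at hus
  have hub : u ∈ L.filter (fun x => pvSuf x == b) :=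
    ((PySem.List.sorted_perm _ _ _).mem_iff).mp hus
  have : pvSuf u = b := by simpa using (List.mem_filter.mp hub).2
  rw [← hua, this]

theorem Ex12_eq (xs : List String) : Ex12 xs = Ex12_alt xs := by
  unfold Ex12 Ex12_alt
  rw [pvAux_eq_ofList, pvFoldB, pvNew_nil_eq_ofList]
  set L := PySem.Set.ofList xs with hL
  have hnd : L.Nodup := PySem.Set.nodup_ofList xs
  -- B side: values of the group dict
  have hkeys := pvKeysD L
  have hvals : ((L.foldl (fun d w => d.modify (pvSuf w) [] (fun g => g ++ [w]))
      PySem.Dict.empty : PySem.Dict String (List String))).values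
      = (PySem.Set.ofList (L.map pvSuf)).map
          (fun k => L.filter (fun w => pvSuf w == k)) := by
    rw [PySem.Dict.values_eq_map_keys _ (by rw [hkeys]; exact PySem.Set.nodup_ofList _) []]
    rw [hkeys]
    apply List.map_congr_left
    intro k _
    exact pvGetDD L k
  simp only [hvals, List.map_map]
  -- A side: replace the inner scan by the sorted suffix class, then the res loop is an image dedup
  have hA : L.foldl (fun res word =>
      let formed := PySem.List.sorted
        (L.foldl (fun fl w2 =>
          if word ≠ w2 ∧ pvSuf word = pvSuf w2 then fl ++ [w2] else fl) [word])
        (fun x => x) false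
      if formed ∈ res then res else res ++ [formed]) []
      = L.foldl (fun res word =>
          PySem.Set.add res (PySem.List.sorted
            (L.filter (fun x => pvSuf x == pvSuf word)) (fun x => x) false)) [] := by
    apply PySem.List.foldl_congr_mem
    intro acc w hw
    rw [pvFormed_eq L hnd w hw, PySem.Set.add_eq_ite]
  rw [hA]
  have himg : L.foldl (fun res word =>
      PySem.Set.add res (PySem.List.sorted
        (L.filter (fun x => pvSuf x == pvSuf word)) (fun x => x) false)) []
      = PySem.Set.ofList (L.map (fun word => PySem.List.sorted
          (L.filter (fun x => pvSuf x == pvSuf word)) (fun x => x) false)) := by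
    rw [PySem.Set.ofList_eq_foldl, List.foldl_map]
  rw [himg]
  have hmm : L.map (fun word => PySem.List.sorted
      (L.filter (fun x => pvSuf x == pvSuf word)) (fun x => x) false)
      = (L.map pvSuf).map (fun k => PySem.List.sorted
          (L.filter (fun x => pvSuf x == k)) (fun x => x) false) := by
    rw [List.map_map]
    rfl
  rw [hmm, pvOfList_map_of_injOn _ _ (pvG_injOn L)]
  simp [Function.comp_def]

-- ===== VERDICT (by name: the statement is the Claim_ definition above) =====
theorem Ex12_spec : Claim_equal_Ex12 := by
  intro my_list _
  unfold Spec_Ex12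
  exact Ex12_eq my_list
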